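-- pv_equiv track=rewrite | github.com/kroften4/conupr1 | cal_utils.py | month_join
-- ===== SOURCE A (Python) =====
-- def month_join(month1: str, month2: str, separator: str):
--     if (month1 == ""):
--         return month2
--     lines1 = month1.split("\n")[:-1]
--     lines2 = month2.split("\n")[:-1]
--     empty_line = " " * 20
--     if len(lines1) > len(lines2):
--         lines2 += [empty_line] * (len(lines1) - len(lines2))
--     elif len(lines2) > len(lines1):
--         lines1 += [empty_line] * (len(lines2) - len(lines1))
--     result: list[str] = []
--     for line1, line2 in zip(lines1, lines2):
--         result.append(line1 + separator + line2)
--     return "\n".join(result) + "\n"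
-- ===== SOURCE B (Python) =====
-- def month_join(month1: str, month2: str, separator: str):
--     if month1 == "":
--         return month2
--     blank = " " * 20
--     out = []
--     i = j = 0
--     while True:
--         k1 = month1.find("\n", i)
--         k2 = month2.find("\n", j)
--         if k1 < 0 and k2 < 0:
--             break
--         if k1 >= 0:
--             line1, i = month1[i:k1], k1 + 1
--         else:
--             line1 = blank
--         if k2 >= 0:
--             line2, j = month2[j:k2], k2 + 1
--         else:
--             line2 = blank
--         out.append(line1 + separator + line2)
--     return "\n".join(out) + "\n"
-- ===== Notes on version B (the rewrite author's own statement) =====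
-- stated objective: alternative
-- what changed: Replaces A's split-into-lines / pad-the-shorter-list / zip pipeline with a two-pointer character scan: str.find locates each side's next newline, the loop emits line1+separator+line2 per step (a 20-space blank when one side has no newline left) and stops when neither side does; no line lists are ever padded or zipped.
import Mathlib
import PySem

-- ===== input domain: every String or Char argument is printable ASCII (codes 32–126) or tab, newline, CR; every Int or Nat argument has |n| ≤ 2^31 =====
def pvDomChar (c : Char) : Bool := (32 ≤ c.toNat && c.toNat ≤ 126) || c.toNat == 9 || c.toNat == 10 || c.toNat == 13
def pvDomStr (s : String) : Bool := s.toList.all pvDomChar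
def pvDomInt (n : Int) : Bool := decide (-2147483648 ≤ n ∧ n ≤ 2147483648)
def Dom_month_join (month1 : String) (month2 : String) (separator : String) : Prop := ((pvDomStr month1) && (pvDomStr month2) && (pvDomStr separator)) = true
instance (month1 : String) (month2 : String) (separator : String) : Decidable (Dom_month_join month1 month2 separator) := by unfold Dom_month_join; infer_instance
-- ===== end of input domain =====

-- B replaces A's split/pad/zip/join pipeline with a two-pointer character scan:
-- it repeatedly takes the next "\n"-terminated line from each input string (str.find),
-- filling with a blank line when one string has no newline left (alternative decomposition, same cost).

-- ===== PORT A =====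
def month_join (month1 : String) (month2 : String) (separator : String) : String :=
  if month1 = "" then month2
  else
    let lines1 := PySem.List.slice ((PySem.Str.split? month1 "\n").getD []) none (some (-1))
    let lines2 := PySem.List.slice ((PySem.Str.split? month2 "\n").getD []) none (some (-1))
    let empty_line := "                    "  -- " " * 20
    let p :=
      if lines1.length > lines2.length then
        (lines1, lines2 ++ List.replicate (lines1.length - lines2.length) empty_line)
      else if lines2.length > lines1.length then
        (lines1 ++ List.replicate (lines2.length - lines1.length) empty_line, lines2)
      else (lines1, lines2)
    let result := (p.1.zip p.2).foldl (fun acc q => acc ++ [q.1 ++ separator ++ q.2]) []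
    PySem.Str.join "\n" result ++ "\n"

-- ===== PORT B =====
-- Source B's `month.find("\n", i)` / `month[i:k]` pointer bookkeeping is ported as scanning the
-- remaining suffix of the string's character list: splitFirstNl returns the segment before
-- the first '\n' together with the suffix after it (none ↔ no '\n' left, i.e. find < 0).
def pvBlankC : List Char := List.replicate 20 ' '  -- " " * 20

def splitFirstNl : List Char → Option (List Char × List Char)
  | [] => none
  | c :: cs =>
    if c = '\n' then some ([], cs)
    else (splitFirstNl cs).map (fun p => (c :: p.1, p.2))

-- termination measure for the scan loop (the port cites it in decreasing_by)
theorem splitFirstNl_shrinks : ∀ (cs : List Char) (p : List Char × List Char),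
    splitFirstNl cs = some p → p.2.length < cs.length := by
  intro cs
  induction cs with
  | nil => intro p h; simp [splitFirstNl] at h
  | cons c rest ih =>
    intro p h
    simp only [splitFirstNl] at h
    split_ifs at h with hc
    · cases h; simp
    · cases hq : splitFirstNl rest with
      | none => rw [hq] at h; simp at h
      | some q =>
        rw [hq] at h
        simp only [Option.map_some, Option.some.injEq] at h
        have := ih q hq
        cases h; simp; omega

-- the while loop of Source B: take the next line of each side (or the blank filler), stop when
-- neither side has a newline left
def joinLoop (sep : List Char) (cs1 cs2 : List Char) : List (List Char) :=
  match h1 : splitFirstNl cs1, h2 : splitFirstNl cs2 with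
  | none, none => []
  | some p1, none => (p1.1 ++ sep ++ pvBlankC) :: joinLoop sep p1.2 cs2
  | none, some p2 => (pvBlankC ++ sep ++ p2.1) :: joinLoop sep cs1 p2.2
  | some p1, some p2 => (p1.1 ++ sep ++ p2.1) :: joinLoop sep p1.2 p2.2
termination_by cs1.length + cs2.length
decreasing_by
  · have := splitFirstNl_shrinks cs1 p1 h1; omega
  · have := splitFirstNl_shrinks cs2 p2 h2; omega
  · have := splitFirstNl_shrinks cs1 p1 h1
    have := splitFirstNl_shrinks cs2 p2 h2; omega

def month_join_alt (month1 : String) (month2 : String) (separator : String) : String :=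
  if month1 = "" then month2
  else
    PySem.Str.join "\n"
      ((joinLoop separator.toList month1.toList month2.toList).map String.ofList) ++ "\n"

-- ===== PRECONDITION & SPEC =====
def Spec_month_join (month1 : String) (month2 : String) (separator : String) (out : String) : Prop := out = month_join_alt month1 month2 separator
instance (month1 : String) (month2 : String) (separator : String) (out : String) : Decidable (Spec_month_join month1 month2 separator out) := by unfold Spec_month_join; infer_instance

-- ===== CLAIM (what is proved, stated in full; the proofs are below) =====
def Claim_equal_month_join : Prop := ∀ (month1 : String) (month2 : String) (separator : String), Dom_month_join month1 month2 separator → Spec_month_join month1 month2 separator (month_join month1 month2 separator)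

-- ===== LEMMAS AND PROOFS =====

-- pure recursive form of PySem.Chars.splitOn on the single-character separator '\n'
def nlSplit : List Char → List (List Char)
  | [] => [[]]
  | c :: rest => if c = '\n' then [] :: nlSplit rest else (nlSplit rest).modifyHead (c :: ·)

theorem nlSplit_ne_nil (s : List Char) : nlSplit s ≠ [] := by
  induction s with
  | nil => simp [nlSplit]
  | cons c rest ih =>
    simp only [nlSplit]
    split_ifs
    · simp
    · cases h : nlSplit rest with
      | nil => exact absurd h ih
      | cons x xs => simp [List.modifyHead]

theorem splitOn_go_nl (fuel : Nat) : ∀ (l cur : List Char) (acc : List (List Char)),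
    l.length < fuel →
    PySem.Chars.splitOn.go ['\n'] fuel l cur acc
      = acc.reverse ++ (nlSplit l).modifyHead (cur.reverse ++ ·) := by
  induction fuel with
  | zero => intro l cur acc h; omega
  | succ fuel ih =>
    intro l cur acc h
    cases l with
    | nil => simp [PySem.Chars.splitOn.go, nlSplit]
    | cons c rest =>
      simp only [PySem.Chars.splitOn.go]
      by_cases hc : c = '\n'
      · have hpre : List.isPrefixOf ['\n'] (c :: rest) = true := by simp [hc, List.isPrefixOf]
        rw [if_pos hpre]
        have : List.drop (['\n'] : List Char).length (c :: rest) = rest := by simp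
        rw [this, ih rest [] (cur.reverse :: acc) (by simp at h; omega)]
        simp only [nlSplit, if_pos hc, List.modifyHead]
        cases nlSplit rest <;> simp
      · have hpre : List.isPrefixOf ['\n'] (c :: rest) = false := by
          simp [List.isPrefixOf]
          intro h'; exact absurd h'.symm hc
        rw [if_neg (by simp [hpre])]
        rw [ih rest (c :: cur) acc (by simp at h; omega)]
        have hne := nlSplit_ne_nil rest
        cases hr : nlSplit rest with
        | nil => exact absurd hr hne
        | cons x xs =>
          simp [nlSplit, hc, hr, List.modifyHead]

theorem splitOn_eq_nlSplit (s : List Char) :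
    PySem.Chars.splitOn s ['\n'] = nlSplit s := by
  show PySem.Chars.splitOn.go ['\n'] (s.length + 1) s [] [] = nlSplit s
  rw [splitOn_go_nl (s.length + 1) s [] [] (by omega)]
  cases nlSplit s <;> simp

theorem nlSplit_of_none {s : List Char} (h : splitFirstNl s = none) : nlSplit s = [s] := by
  induction s with
  | nil => simp [nlSplit]
  | cons c rest ih =>
    simp only [splitFirstNl] at h
    split_ifs at h with hc
    rw [Option.map_eq_none_iff] at h
    simp [nlSplit, hc, ih h, List.modifyHead]

theorem nlSplit_of_some : ∀ {s : List Char} {p : List Char × List Char},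
    splitFirstNl s = some p → nlSplit s = p.1 :: nlSplit p.2 := by
  intro s
  induction s with
  | nil => intro p h; simp [splitFirstNl] at h
  | cons c rest ih =>
    intro p h
    simp only [splitFirstNl] at h
    split_ifs at h with hc
    · cases h; simp [nlSplit, hc]
    · cases hq : splitFirstNl rest with
      | none => rw [hq] at h; simp at h
      | some q =>
        rw [hq] at h
        simp only [Option.map_some, Option.some.injEq] at h
        cases h
        have hne := nlSplit_ne_nil q.2
        rw [nlSplit] at *
        simp only [if_neg hc, ih hq]
        simp [List.modifyHead]

-- the lines A works with: everything before the last separator-free tail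
def linesOf (s : List Char) : List (List Char) := (nlSplit s).dropLast

theorem linesOf_of_none {s : List Char} (h : splitFirstNl s = none) : linesOf s = [] := by
  simp [linesOf, nlSplit_of_none h]

theorem linesOf_of_some {s : List Char} {p : List Char × List Char}
    (h : splitFirstNl s = some p) : linesOf s = p.1 :: linesOf p.2 := by
  simp [linesOf, nlSplit_of_some h, List.dropLast_cons_of_ne_nil (nlSplit_ne_nil p.2)]

-- A's normalise-then-zip, as one closed form (generic in the element type)
def padMerge {α : Type} (sep d : α) (ap : α → α → α) (l1 l2 : List α) : List α :=
  ((l1 ++ List.replicate (l2.length - l1.length) d).zip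
    (l2 ++ List.replicate (l1.length - l2.length) d)).map (fun q => ap (ap q.1 sep) q.2)

theorem padMerge_nil_nil {α : Type} (sep d : α) (ap : α → α → α) :
    padMerge sep d ap [] [] = [] := by simp [padMerge]

theorem padMerge_cons_nil {α : Type} (sep d : α) (ap : α → α → α) (a : α) (as : List α) :
    padMerge sep d ap (a :: as) [] = ap (ap a sep) d :: padMerge sep d ap as [] := by
  simp [padMerge, List.replicate_succ]

theorem padMerge_nil_cons {α : Type} (sep d : α) (ap : α → α → α) (b : α) (bs : List α) :
    padMerge sep d ap [] (b :: bs) = ap (ap d sep) b :: padMerge sep d ap [] bs := by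
  simp [padMerge, List.replicate_succ]

theorem padMerge_cons_cons {α : Type} (sep d : α) (ap : α → α → α) (a b : α) (as bs : List α) :
    padMerge sep d ap (a :: as) (b :: bs) = ap (ap a sep) b :: padMerge sep d ap as bs := by
  simp [padMerge]

theorem joinLoop_eq_padMerge (sep : List Char) : ∀ (cs1 cs2 : List Char),
    joinLoop sep cs1 cs2
      = padMerge sep pvBlankC (· ++ ·) (linesOf cs1) (linesOf cs2) := by
  intro cs1 cs2
  fun_induction joinLoop sep cs1 cs2 <;>
    simp_all [linesOf_of_none, linesOf_of_some,
      padMerge_nil_nil, padMerge_cons_nil, padMerge_nil_cons, padMerge_cons_cons]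

theorem map_ofList_padMerge (sep d : List Char) (l1 l2 : List (List Char)) :
    (padMerge sep d (· ++ ·) l1 l2).map String.ofList
      = padMerge (String.ofList sep) (String.ofList d) (· ++ ·)
          (l1.map String.ofList) (l2.map String.ofList) := by
  simp only [padMerge, ← List.map_replicate (f := String.ofList), ← List.map_append,
    List.zip_map, List.map_map, List.length_map]
  congr 1
  funext q
  simp [String.ofList_append, String.append_assoc]

theorem split_lines_eq (m : String) :
    PySem.List.slice ((PySem.Str.split? m "\n").getD []) none (some (-1))
      = (linesOf m.toList).map String.ofList := by
  rw [PySem.List.slice_to_neg_one]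
  have hsep : ("\n" : String).toList = ['\n'] := by decide
  simp only [PySem.Str.split?, PySem.Chars.split?, hsep]
  simp [splitOn_eq_nlSplit, linesOf]

-- ===== VERDICT (by name: the statement is the Claim_ definition above) =====
theorem month_join_spec : Claim_equal_month_join := by
  intro month1 month2 separator _
  unfold Spec_month_join month_join month_join_alt
  by_cases h0 : month1 = ""
  · simp [h0]
  · simp only [h0, if_false]
    rw [split_lines_eq, split_lines_eq]
    set l1 := (linesOf month1.toList).map String.ofList with hl1
    set l2 := (linesOf month2.toList).map String.ofList with hl2
    set d := "                    " with hd
    have hpair :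
        (if l1.length > l2.length then
          (l1, l2 ++ List.replicate (l1.length - l2.length) d)
        else if l2.length > l1.length then
          (l1 ++ List.replicate (l2.length - l1.length) d, l2)
        else (l1, l2))
        = (l1 ++ List.replicate (l2.length - l1.length) d,
           l2 ++ List.replicate (l1.length - l2.length) d) := by
      split_ifs with hgt hlt
      · have : l2.length - l1.length = 0 := by omega
        simp [this]
      · have : l1.length - l2.length = 0 := by omega
        simp [this]
      · have e1 : l2.length - l1.length = 0 := by omega
        have e2 : l1.length - l2.length = 0 := by omega
        simp [e1, e2]
    simp only [hpair]
    rw [PySem.List.foldl_append_singleton_eq_map]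
    rw [joinLoop_eq_padMerge, map_ofList_padMerge]
    have hblank : String.ofList pvBlankC = d := by decide
    have hsep : String.ofList separator.toList = separator := String.ofList_toList
    rw [hblank, hsep, hl1, hl2]
    rfl
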